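-- pv_equiv track=rewrite | github.com/fahimtenzel/ats-rescue | app/suggestions.py | generate_skill_suggestions
-- ===== SOURCE A (Python) =====
-- from typing import List
--
-- def generate_skill_suggestions(jd_skills: List[str], resume_skills: List[str]):
--     """Find missing and matched skills."""
--     jd_lower = [s.lower() for s in jd_skills]
--     res_lower = [s.lower() for s in resume_skills]
--     missing = [s for s in jd_lower if s not in res_lower]
--     matched = [s for s in jd_lower if s in res_lower]
--     return {
--         "missing_skills": missing,
--         "matched_skills": matched,
--     }
-- ===== SOURCE B (Python) =====
-- from typing import List
--
-- def generate_skill_suggestions(jd_skills: List[str], resume_skills: List[str]):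
--     """Find missing and matched skills via binary search over a sorted resume index."""
--     index = sorted(s.lower() for s in resume_skills)
--     def found(x):
--         lo, hi = 0, len(index)
--         while lo < hi:
--             mid = (lo + hi) // 2
--             if index[mid] < x:
--                 lo = mid + 1
--             else:
--                 hi = mid
--         return lo < len(index) and index[lo] == x
--     missing = []
--     matched = []
--     for s in jd_skills:
--         sl = s.lower()
--         (matched if found(sl) else missing).append(sl)
--     return {
--         "missing_skills": missing,
--         "matched_skills": matched,
--     }
-- ===== Notes on version B (the rewrite author's own statement) =====
-- stated objective: faster
-- what changed: A lowercases the jd list and filters it twice with a linear membership scan over the lowered resume list; B instead sorts the lowered resume skills once and answers each membership query with a hand-written binary search while partitioning jd_skills into missing/matched in a single pass.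
import Mathlib
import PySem

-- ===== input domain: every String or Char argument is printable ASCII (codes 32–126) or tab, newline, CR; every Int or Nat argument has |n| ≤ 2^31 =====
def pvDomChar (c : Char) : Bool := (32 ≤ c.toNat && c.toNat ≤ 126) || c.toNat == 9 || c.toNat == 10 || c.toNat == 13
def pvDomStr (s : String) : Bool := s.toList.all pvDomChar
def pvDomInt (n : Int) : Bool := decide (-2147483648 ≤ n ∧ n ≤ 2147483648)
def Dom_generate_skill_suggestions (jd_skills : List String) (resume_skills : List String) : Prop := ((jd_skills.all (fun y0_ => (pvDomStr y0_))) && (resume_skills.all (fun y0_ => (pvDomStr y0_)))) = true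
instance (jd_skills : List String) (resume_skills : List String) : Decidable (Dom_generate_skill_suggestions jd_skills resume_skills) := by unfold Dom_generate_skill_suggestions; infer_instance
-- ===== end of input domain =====

-- B replaces A's two linear-scan filter passes by a sorted index over the lowered resume
-- skills queried by binary search, partitioning jd_skills in a single pass.

-- ===== PORT A =====
def generate_skill_suggestions (jd_skills : List String) (resume_skills : List String) : List (String × List String) :=
  let jd_lower := jd_skills.map PySem.Str.lower
  let res_lower := resume_skills.map PySem.Str.lower
  let missing := jd_lower.filter (fun s => !(res_lower.contains s))
  let matched := jd_lower.filter (fun s => res_lower.contains s)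
  [("missing_skills", missing), ("matched_skills", matched)]

-- ===== PORT B =====
-- the 'while lo < hi' binary-search loop of Source B's found(); lo/hi stay in 0..len(index) so
-- they are Nat and (lo+hi)//2 is Nat division, exactly Python's //; index[mid] is in range
-- whenever lo ≤ mid < hi ≤ len, so getD is exact there
def pvSearchLoop (index : List String) (x : String) (lo hi : Nat) : Nat :=
  if lo < hi then
    let mid := (lo + hi) / 2
    if index.getD mid "" < x then
      pvSearchLoop index x (mid + 1) hi
    else
      pvSearchLoop index x lo mid
  else lo
termination_by hi - lo
decreasing_by all_goals omega

-- Source B's found(x): binary search, then 'lo < len(index) and index[lo] == x'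
def pvFound (index : List String) (x : String) : Bool :=
  let lo := pvSearchLoop index x 0 index.length
  decide (lo < index.length) && (index.getD lo "" == x)

-- Source B's 'for s in jd_skills' partition loop
def pvPartition (index : List String) (missing matched : List String) :
    List String → List String × List String
  | [] => (missing, matched)
  | s :: rest =>
    let sl := PySem.Str.lower s
    if pvFound index sl then
      pvPartition index missing (matched ++ [sl]) rest
    else
      pvPartition index (missing ++ [sl]) matched rest

def generate_skill_suggestions_alt (jd_skills : List String) (resume_skills : List String) : List (String × List String) :=
  let index := PySem.List.sorted (resume_skills.map PySem.Str.lower) (fun s => s) false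
  let (missing, matched) := pvPartition index [] [] jd_skills
  [("missing_skills", missing), ("matched_skills", matched)]

-- ===== PRECONDITION & SPEC =====
def Spec_generate_skill_suggestions (jd_skills : List String) (resume_skills : List String) (out : List (String × List String)) : Prop := out = generate_skill_suggestions_alt jd_skills resume_skills
instance (jd_skills : List String) (resume_skills : List String) (out : List (String × List String)) : Decidable (Spec_generate_skill_suggestions jd_skills resume_skills out) := by unfold Spec_generate_skill_suggestions; infer_instance

-- ===== CLAIM (what is proved, stated in full; the proofs are below) =====
def Claim_equal_generate_skill_suggestions : Prop := ∀ (jd_skills : List String) (resume_skills : List String), Dom_generate_skill_suggestions jd_skills resume_skills → Spec_generate_skill_suggestions jd_skills resume_skills (generate_skill_suggestions jd_skills resume_skills)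

-- ===== LEMMAS AND PROOFS =====

-- on a (≤)-sorted index, getD is monotone below the length
theorem pvGetD_mono (index : List String) (hs : index.Pairwise (· ≤ ·))
    (i j : Nat) (hij : i ≤ j) (hj : j < index.length) :
    index.getD i "" ≤ index.getD j "" := by
  rw [List.getD_eq_getElem _ _ (by omega), List.getD_eq_getElem _ _ hj]
  rcases Nat.eq_or_lt_of_le hij with h | h
  · subst h; exact le_refl _
  · exact (List.pairwise_iff_getElem.mp hs) i j (by omega) hj h

-- bracket invariant of the binary-search loop on a sorted index: the result r satisfies
-- lo ≤ r ≤ hi, entries of [lo, r) are < x, entries of [r, hi) are ≥ x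
theorem pvSearchLoop_bracket (index : List String) (x : String)
    (hs : index.Pairwise (· ≤ ·)) (lo hi : Nat) (hlh : lo ≤ hi) (hhi : hi ≤ index.length) :
    lo ≤ pvSearchLoop index x lo hi ∧ pvSearchLoop index x lo hi ≤ hi ∧
      (∀ j, lo ≤ j → j < pvSearchLoop index x lo hi → index.getD j "" < x) ∧
      (∀ j, pvSearchLoop index x lo hi ≤ j → j < hi → ¬ index.getD j "" < x) := by
  induction lo, hi using pvSearchLoop.induct index x with
  | case1 lo hi h mid hlt ih =>
    have hmid : (lo + hi) / 2 = mid := rfl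
    obtain ⟨h1, h2, h3, h4⟩ := ih (by omega) hhi
    rw [pvSearchLoop]
    simp only [h, if_true, hmid]
    rw [if_pos hlt]
    refine ⟨by omega, h2, ?_, h4⟩
    intro j hj1 hj2
    by_cases hj : mid + 1 ≤ j
    · exact h3 j hj hj2
    · exact lt_of_le_of_lt (pvGetD_mono index hs j mid (by omega) (by omega)) hlt
  | case2 lo hi h mid hlt ih =>
    have hmid : (lo + hi) / 2 = mid := rfl
    obtain ⟨h1, h2, h3, h4⟩ := ih (by omega) (by omega)
    rw [pvSearchLoop]
    simp only [h, if_true, hmid]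
    rw [if_neg hlt]
    refine ⟨h1, by omega, h3, ?_⟩
    intro j hj1 hj2
    by_cases hj : j < mid
    · exact h4 j hj1 hj
    · intro hcon
      exact hlt (lt_of_le_of_lt (pvGetD_mono index hs mid j (by omega) (by omega)) hcon)
  | case3 lo hi h =>
    rw [pvSearchLoop]
    simp only [h, if_false]
    refine ⟨le_refl _, by omega, ?_, ?_⟩ <;>
      exact fun j hj1 hj2 => (by omega : False).elim

-- on a sorted index, Source B's found(x) is exactly list membership
theorem pvFound_eq_contains (index : List String) (hs : index.Pairwise (· ≤ ·)) (x : String) :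
    pvFound index x = index.contains x := by
  obtain ⟨h1, h2, h3, h4⟩ :=
    pvSearchLoop_bracket index x hs 0 index.length (Nat.zero_le _) (le_refl _)
  set r := pvSearchLoop index x 0 index.length with hr
  by_cases hm : x ∈ index
  · -- x occurs at some position j; show r < len and index[r] = x
    obtain ⟨j, hj, hjx⟩ := List.getElem_of_mem hm
    have hjr : r ≤ j := by
      by_contra hc
      have := h3 j (by omega) (by omega)
      rw [List.getD_eq_getElem _ _ hj, hjx] at this
      exact lt_irrefl x this
    have hrlen : r < index.length := by omega
    have hge : ¬ index.getD r "" < x := h4 r (le_refl _) hrlen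
    have hle : index.getD r "" ≤ index.getD j "" := pvGetD_mono index hs r j hjr hj
    rw [List.getD_eq_getElem _ _ hj, hjx] at hle
    have heq : index[r] = x := by
      have := le_antisymm hle (not_lt.mp hge)
      rwa [List.getD_eq_getElem _ _ hrlen] at this
    simp [pvFound, ← hr, hrlen, heq, hm]
  · -- x not in the list: index[r] ≠ x whenever r < len
    have hne : pvFound index x = false := by
      unfold pvFound
      rw [← hr]
      by_cases hrlen : r < index.length
      · have hx : index[r] ≠ x := fun hcon => hm (hcon ▸ List.getElem_mem hrlen)
        simp [hrlen, hx]
      · simp [hrlen]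
    simp [hne, hm]

-- the partition loop accumulates the two filters of the lowered jd list
theorem pvPartition_eq (index : List String) (jd : List String)
    (missing matched : List String) :
    pvPartition index missing matched jd =
      (missing ++ (jd.map PySem.Str.lower).filter (fun s => !(pvFound index s)),
       matched ++ (jd.map PySem.Str.lower).filter (fun s => pvFound index s)) := by
  induction jd generalizing missing matched with
  | nil => simp [pvPartition]
  | cons s rest ih =>
    simp only [pvPartition, List.map_cons, List.filter_cons]
    by_cases h : pvFound index (PySem.Str.lower s)
    · simp [h, ih]
    · simp [h, ih]

-- ===== VERDICT (by name: the statement is the Claim_ definition above) =====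
theorem generate_skill_suggestions_spec : Claim_equal_generate_skill_suggestions := by
  intro jd resume _
  unfold Spec_generate_skill_suggestions generate_skill_suggestions generate_skill_suggestions_alt
  have hs : (PySem.List.sorted (resume.map PySem.Str.lower) (fun s => s) false).Pairwise (· ≤ ·) :=
    PySem.List.sorted_pairwise (resume.map PySem.Str.lower) (fun s => s)
  have hmem : ∀ x, (PySem.List.sorted (resume.map PySem.Str.lower) (fun s => s) false).contains x
      = (resume.map PySem.Str.lower).contains x := by
    intro x
    simp [PySem.List.mem_sorted]
  have hfound : ∀ x, pvFound (PySem.List.sorted (resume.map PySem.Str.lower) (fun s => s) false) x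
      = (resume.map PySem.Str.lower).contains x := by
    intro x
    rw [pvFound_eq_contains _ hs, hmem]
  simp only [pvPartition_eq, List.nil_append]
  have hf : (fun s => pvFound (PySem.List.sorted (resume.map PySem.Str.lower) (fun s => s) false) s)
      = (fun s => (resume.map PySem.Str.lower).contains s) := funext hfound
  simp [hf]
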